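-- pv_equiv track=rewrite | github.com/Akash-Is1am/problemRecommend | recommendation/recommend.py | take_with_escape
-- ===== SOURCE A (Python) =====
-- def take_with_escape(recommended_problems):
--     selected_problems = []
--     consecutive_count = 0
--     last_level = None
--
--     # Iterate through recommended_problems and populate selected_problems
--     for problem_info in recommended_problems:
--         problem = problem_info["problem"]
--         level = problem["level"]
--
--         if level != last_level:
--             last_level = level
--             consecutive_count = 0
--
--         if consecutive_count < 20:
--             selected_problems.append(problem_info)
--             consecutive_count += 1
--         else:
--             continue
--
--     return selected_problems
-- ===== SOURCE B (Python) =====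
-- def take_with_escape(recommended_problems):
--     # group-then-cap: split into maximal runs of equal consecutive level,
--     # keep at most the first 20 of each run
--     selected_problems = []
--     rest = recommended_problems
--     while rest:
--         level = rest[0]["problem"]["level"]
--         run_len = 1
--         while run_len < len(rest) and rest[run_len]["problem"]["level"] == level:
--             run_len += 1
--         selected_problems.extend(rest[:min(run_len, 20)])
--         rest = rest[run_len:]
--     return selected_problems
-- ===== Notes on version B (the rewrite author's own statement) =====
-- stated objective: idiomatic
-- what changed: Replaces the running consecutive_count/last_level state machine by an explicit group-then-cap structure: split the list into maximal runs of equal consecutive level and keep the first 20 of each run.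
import Mathlib
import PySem

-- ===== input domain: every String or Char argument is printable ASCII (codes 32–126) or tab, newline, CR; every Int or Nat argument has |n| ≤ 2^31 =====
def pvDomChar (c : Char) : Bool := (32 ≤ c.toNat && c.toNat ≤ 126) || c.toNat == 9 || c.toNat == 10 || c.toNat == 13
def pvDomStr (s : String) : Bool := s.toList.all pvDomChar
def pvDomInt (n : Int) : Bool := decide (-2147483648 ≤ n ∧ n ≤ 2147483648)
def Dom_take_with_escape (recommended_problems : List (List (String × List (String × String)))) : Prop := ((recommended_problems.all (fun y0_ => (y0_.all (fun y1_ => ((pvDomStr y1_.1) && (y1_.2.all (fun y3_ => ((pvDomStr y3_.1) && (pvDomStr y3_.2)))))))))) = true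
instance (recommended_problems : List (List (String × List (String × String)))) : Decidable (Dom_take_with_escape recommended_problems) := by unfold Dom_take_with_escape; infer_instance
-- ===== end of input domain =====

-- B replaces A's running consecutive_count/last_level state machine by an explicit
-- group-then-cap decomposition (maximal runs of equal level, first 20 of each); same cost.

-- pi["problem"]["level"]: first-match lookup; total form, exact under Pre_ (keys present)
def pvLevel (pi : List (String × List (String × String))) : String :=
  ((((pi.lookup "problem").getD []).lookup "level").getD "")

-- ===== PORT A =====
-- the loop: state = (consecutive_count, last_level), output built element by element
def pvGoA : List (List (String × List (String × String))) → Nat → Option String →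
    List (List (String × List (String × String)))
  | [], _, _ => []
  | pi :: rest, c, last =>
    let level := pvLevel pi
    let (c', last') := if (some level ≠ last) then (0, some level) else (c, last)
    if c' < 20 then pi :: pvGoA rest (c' + 1) last' else pvGoA rest c' last'

def take_with_escape (recommended_problems : List (List (String × List (String × String)))) : List (List (String × List (String × String))) :=
  pvGoA recommended_problems 0 none

-- ===== PORT B =====
-- Source B's outer while: peel one maximal run of equal level, keep its first 20
def pvGoB : List (List (String × List (String × String))) →
    List (List (String × List (String × String)))
  | [] => []
  | pi :: r =>
    let k := pvLevel pi
    let run := r.takeWhile (fun x => pvLevel x == k)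
    (pi :: run).take 20 ++ pvGoB (r.dropWhile (fun x => pvLevel x == k))
termination_by l => l.length
decreasing_by exact Nat.lt_succ_of_le (List.length_dropWhile_le _ _)

def take_with_escape_alt (recommended_problems : List (List (String × List (String × String)))) : List (List (String × List (String × String))) :=
  pvGoB recommended_problems

-- ===== PRECONDITION & SPEC =====
-- Pre_: every element has a "problem" entry which has a "level" entry (else Python raises KeyError)
def Pre_take_with_escape (recommended_problems : List (List (String × List (String × String)))) : Prop :=
  (recommended_problems.all (fun pi =>
    (pi.lookup "problem").isSome && (((pi.lookup "problem").getD []).lookup "level").isSome)) = true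
instance (recommended_problems : List (List (String × List (String × String)))) : Decidable (Pre_take_with_escape recommended_problems) := by unfold Pre_take_with_escape; infer_instance

def pvWitness_take_with_escape : (List (List (String × List (String × String)))) :=
  [[("problem", [("level", "1"), ("id", "7")])], [("problem", [("level", "2")])]]

def Spec_take_with_escape (recommended_problems : List (List (String × List (String × String)))) (out : List (List (String × List (String × String)))) : Prop := out = take_with_escape_alt recommended_problems
instance (recommended_problems : List (List (String × List (String × String)))) (out : List (List (String × List (String × String)))) : Decidable (Spec_take_with_escape recommended_problems out) := by unfold Spec_take_with_escape; infer_instance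

-- ===== CLAIM (what is proved, stated in full; the proofs are below) =====
def Claim_equal_take_with_escape : Prop := ∀ (recommended_problems : List (List (String × List (String × String)))), Dom_take_with_escape recommended_problems → Pre_take_with_escape recommended_problems → Spec_take_with_escape recommended_problems (take_with_escape recommended_problems)

-- ===== LEMMAS AND PROOFS =====

-- within a run of level k with counter c, A keeps exactly the first 20 - c elements
lemma pvGoA_run (k : String) (rest : List (List (String × List (String × String))))
    (H : ∀ c, pvGoA rest c (some k) = pvGoB rest) :
    ∀ run c, (∀ x ∈ run, pvLevel x = k) →
      pvGoA (run ++ rest) c (some k) = run.take (20 - c) ++ pvGoB rest := by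
  intro run
  induction run with
  | nil => intro c _; simpa using H c
  | cons x run' ih =>
    intro c hmem
    have hx : pvLevel x = k := hmem x (by simp)
    simp only [List.cons_append, pvGoA, hx]
    have : ¬ (some k ≠ some k) := by simp
    rw [if_neg this]
    by_cases hc : c < 20
    · rw [if_pos hc, ih (c + 1) (fun y hy => hmem y (by simp [hy]))]
      have h20 : 20 - c = (20 - (c + 1)) + 1 := by omega
      simp [h20]
    · rw [if_neg hc, ih c (fun y hy => hmem y (by simp [hy]))]
      have h1 : 20 - c = 0 := by omega
      have h2 : 20 - (c : Nat) = 0 := h1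
      simp [h1]

-- A with a fresh head (level differs from last_level) equals B
lemma pvGoA_fresh : ∀ (n : Nat) (xs : List (List (String × List (String × String)))),
    xs.length ≤ n → ∀ (c : Nat) (last : Option String),
    (∀ x, xs.head? = some x → some (pvLevel x) ≠ last) →
    pvGoA xs c last = pvGoB xs := by
  intro n
  induction n with
  | zero =>
    intro xs hlen c last _
    have hx : xs = [] := List.eq_nil_of_length_eq_zero (Nat.le_zero.mp hlen)
    subst hx; simp [pvGoA, pvGoB]
  | succ n ih =>
    intro xs hlen c last hfresh
    match xs with
    | [] => simp [pvGoA, pvGoB]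
    | pi :: r =>
      have hne : some (pvLevel pi) ≠ last := hfresh pi rfl
      simp only [pvGoA]
      rw [if_pos hne, if_pos (by omega : (0:Nat) < 20)]
      set k := pvLevel pi with hk
      set p := (fun x => pvLevel x == k) with hp
      have hsplit : r = r.takeWhile p ++ r.dropWhile p := (List.takeWhile_append_dropWhile).symm
      have hHrest : ∀ c', pvGoA (r.dropWhile p) c' (some k) = pvGoB (r.dropWhile p) := by
        intro c'
        apply ih
        · have := List.length_dropWhile_le p r
          simp at hlen; omega
        · intro x hx
          match hd : r.dropWhile p with
          | [] => simp [hd] at hx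
          | y :: t =>
            rw [hd] at hx
            simp at hx
            subst hx
            have h0 : 0 < (r.dropWhile p).length := by rw [hd]; simp
            have hnp := List.dropWhile_get_zero_not p r h0
            have hy : (r.dropWhile p)[0]'h0 = y := by
              have h1 : (r.dropWhile p)[0]? = some y := by rw [hd]; rfl
              rw [List.getElem?_eq_getElem h0] at h1
              exact Option.some.inj h1
            simp only [List.get_eq_getElem] at hnp
            rw [hy] at hnp
            simp [hp] at hnp
            simp [hnp]
      have hmem : ∀ x ∈ r.takeWhile p, pvLevel x = k := by
        intro x hx
        have := List.mem_takeWhile_imp hx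
        simpa [hp] using this
      calc pi :: pvGoA r 1 (some k)
          = pi :: pvGoA (r.takeWhile p ++ r.dropWhile p) 1 (some k) := by rw [← hsplit]
        _ = pi :: ((r.takeWhile p).take 19 ++ pvGoB (r.dropWhile p)) := by
              rw [pvGoA_run k (r.dropWhile p) hHrest (r.takeWhile p) 1 hmem]
        _ = pvGoB (pi :: r) := by
              rw [pvGoB]
              simp [hp, ← hk, List.take_succ_cons]

-- ===== VERDICT (by name: the statement is the Claim_ definition above) =====
theorem take_with_escape_spec : Claim_equal_take_with_escape := by
  intro l _ _
  unfold Spec_take_with_escape take_with_escape take_with_escape_alt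
  exact pvGoA_fresh l.length l (le_refl _) 0 none (by intro x _; simp)
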